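-- pv_equiv track=rewrite | github.com/QuHarmonics/Nexus-4-Framework-Recursive-Harmonic-Architecture | Python Code - Raw Dump/Nexus 4 Framework -SHA_HeatMapts-code_24- Qu Harmonics.py | hex_spiral
-- ===== SOURCE A (Python) =====
-- def hex_spiral(n):
--     """Return first n axial hex coords in a spiral around (0,0)."""
--     coords = [(0, 0)]
--     layer = 1
--     while len(coords) < n:
--         # start at (−layer, 0)
--         q, r = -layer, 0
--         # six directions
--         directions = [(1, -1), (1, 0), (0, 1), (-1, 1), (-1, 0), (0, -1)]
--         for direction in directions:
--             for _ in range(layer):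
--                 if len(coords) >= n:
--                     return coords
--                 q, r = q + direction[0], r + direction[1]
--                 coords.append((q, r))
--         layer += 1
--     return coords[:n]
-- ===== SOURCE B (Python) =====
-- # B: closed-form index->coordinate mapping instead of A's stateful walk:
-- # each index k is decomposed into (ring, side, step) and mapped by arithmetic
-- # on precomputed corner/direction tables; only a ring counter is maintained.
-- _DIRS = [(1, -1), (1, 0), (0, 1), (-1, 1), (-1, 0), (0, -1)]
-- # starting corner of side s in ring L is L * _CORNERS[s]
-- _CORNERS = [(-1, 0), (0, -1), (1, -1), (1, 0), (0, 1), (-1, 1)]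
--
-- def hex_spiral(n):
--     """Return first n axial hex coords in a spiral around (0,0)."""
--     out = []
--     ring = 1
--     for k in range(n):
--         if k == 0:
--             out.append((0, 0))
--             continue
--         while 3 * ring * (ring + 1) < k:
--             ring += 1
--         p = k - 1 - 3 * ring * (ring - 1)   # offset within the ring, 0 <= p < 6*ring
--         side, step = divmod(p, ring)
--         cq, cr = _CORNERS[side]
--         dq, dr = _DIRS[side]
--         out.append((cq * ring + (step + 1) * dq, cr * ring + (step + 1) * dr))
--     return out
-- ===== Notes on version B (the rewrite author's own statement) =====
-- stated objective: alternative
-- what changed: B replaces A's stateful ring-walking loop (mutable coords/q/r with an early return) by a per-index closed form: each index k is decomposed into (ring, side, step) via divmod and mapped to its coordinate by arithmetic on precomputed corner and direction tables, with only a ring counter carried across the range(n) loop.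
import Mathlib
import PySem

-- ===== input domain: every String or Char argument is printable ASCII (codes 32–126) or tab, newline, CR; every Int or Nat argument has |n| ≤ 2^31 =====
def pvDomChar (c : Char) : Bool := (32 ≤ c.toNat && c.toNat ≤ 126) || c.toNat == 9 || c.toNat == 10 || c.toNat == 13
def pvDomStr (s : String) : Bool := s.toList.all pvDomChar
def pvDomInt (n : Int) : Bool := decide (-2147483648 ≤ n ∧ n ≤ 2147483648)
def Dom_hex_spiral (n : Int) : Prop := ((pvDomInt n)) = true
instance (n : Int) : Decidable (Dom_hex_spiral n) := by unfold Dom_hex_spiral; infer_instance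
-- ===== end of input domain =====

-- B re-implements A's ring-walking spiral by a closed-form index→coordinate map; both agree on every n (equivalence is about the return value; neither mutates its argument).

-- ===== PORT A =====
-- A's local `directions` list
def dirsA : List (Int × Int) := [(1, -1), (1, 0), (0, 1), (-1, 1), (-1, 0), (0, -1)]

-- `for _ in range(layer)` body: check `len(coords) >= n` (early return = .inl), else append (q+dq, r+dr)
def innerA (n : Int) (d : Int × Int) : Nat → List (Int × Int) × Int × Int → Sum (List (Int × Int)) (List (Int × Int) × Int × Int)
  | 0, st => .inr st
  | k + 1, (c, q, r) =>
      if n ≤ (c.length : Int) then .inl c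
      else innerA n d k (c ++ [(q + d.1, r + d.2)], q + d.1, r + d.2)

-- `for direction in directions:` loop, propagating the early return
def sidesA (n : Int) (layer : Nat) : List (Int × Int) → List (Int × Int) × Int × Int → Sum (List (Int × Int)) (List (Int × Int) × Int × Int)
  | [], st => .inr st
  | d :: ds, st =>
      match innerA n d layer st with
      | .inl res => .inl res
      | .inr st' => sidesA n layer ds st'

-- termination helpers for the while loop (cited in decreasing_by)
theorem innerA_inr_len (n : Int) (d : Int × Int) : ∀ (k : Nat) (st st' : List (Int × Int) × Int × Int),
    innerA n d k st = .inr st' → st'.1.length = st.1.length + k := by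
  intro k
  induction k with
  | zero => intro st st' h; simp [innerA] at h; simp [h]
  | succ k ih =>
      rintro ⟨c, q, r⟩ st' h
      simp only [innerA] at h
      split at h
      · exact absurd h (by simp)
      · have := ih _ _ h
        simp only [List.length_append, List.length_cons, List.length_nil] at this
        show st'.1.length = c.length + (k + 1)
        omega

theorem sidesA_inr_len (n : Int) (layer : Nat) : ∀ (ds : List (Int × Int)) (st st' : List (Int × Int) × Int × Int),
    sidesA n layer ds st = .inr st' → st'.1.length = st.1.length + layer * ds.length := by
  intro ds
  induction ds with
  | nil => intro st st' h; simp [sidesA] at h; simp [h]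
  | cons d ds ih =>
      intro st st' h
      simp only [sidesA] at h
      split at h
      · exact absurd h (by simp)
      · next st'' heq =>
          have h1 := innerA_inr_len n d layer _ _ heq
          have h2 := ih _ _ h
          simp only [List.length_cons, Nat.mul_succ]
          omega

-- the `while len(coords) < n` loop; `t` encodes Python's `layer` as `layer = t + 1`
def whileA (n : Int) (c : List (Int × Int)) (t : Nat) : List (Int × Int) :=
  if _h : (c.length : Int) < n then
    match h2 : sidesA n (t + 1) dirsA (c, -((t : Int) + 1), 0) with
    | .inl res => res
    | .inr st' => whileA n st'.1 (t + 1)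
  else
    PySem.List.slice c none (some n)   -- coords[:n]
termination_by (n - c.length).toNat
decreasing_by
  have := sidesA_inr_len n (t + 1) dirsA _ _ h2
  simp [dirsA] at this
  omega

def hex_spiral (n : Int) : List (Int × Int) := whileA n [(0, 0)] 0

-- ===== PORT B =====
def dirsB : List (Int × Int) := [(1, -1), (1, 0), (0, 1), (-1, 1), (-1, 0), (0, -1)]
def cornersB : List (Int × Int) := [(-1, 0), (0, -1), (1, -1), (1, 0), (0, 1), (-1, 1)]

-- `while 3*ring*(ring+1) < k: ring += 1`
def findRing (k : Int) (ring : Nat) : Nat :=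
  if 3 * (ring : Int) * (ring + 1) < k then findRing k (ring + 1) else ring
termination_by (k - ring).toNat
decreasing_by
  have hr : (ring : Int) ≤ 3 * (ring : Int) * (ring + 1) := by nlinarith [Int.natCast_nonneg ring]
  omega

-- loop body of the `for k in range(n)` comprehension loop; the state is (ring, out).
-- The `(0,0)` defaults of the table lookups are never used for k ≥ 1 (side is then in [0,6)).
def stepB (st : Nat × List (Int × Int)) (k : Int) : Nat × List (Int × Int) :=
  if k = 0 then (st.1, st.2 ++ [(0, 0)])
  else
    let ring := findRing k st.1
    let p : Int := k - 1 - 3 * (ring : Int) * ((ring : Int) - 1)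
    let side := PySem.Int.floordiv p ring
    let step := PySem.Int.mod p ring
    let c := PySem.List.pyGetD cornersB side (0, 0)
    let d := PySem.List.pyGetD dirsB side (0, 0)
    (ring, st.2 ++ [(c.1 * ring + (step + 1) * d.1, c.2 * ring + (step + 1) * d.2)])

def hex_spiral_alt (n : Int) : List (Int × Int) := ((PySem.List.pyRange 0 n 1).foldl stepB (1, [])).2

-- ===== PRECONDITION & SPEC =====
def Spec_hex_spiral (n : Int) (out : List (Int × Int)) : Prop := out = hex_spiral_alt n
instance (n : Int) (out : List (Int × Int)) : Decidable (Spec_hex_spiral n out) := by unfold Spec_hex_spiral; infer_instance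

-- ===== CLAIM (what is proved, stated in full; the proofs are below) =====
def Claim_equal_hex_spiral : Prop := ∀ (n : Int), Dom_hex_spiral n → Spec_hex_spiral n (hex_spiral n)

-- ===== LEMMAS AND PROOFS =====

-- number of cells strictly before ring (t+1): 1 + 6*1 + 6*2 + … + 6*t
def rs (t : Nat) : Nat := 1 + 3 * t * (t + 1)

-- proof-side: the per-index closed form (ring found from 1)
def coordF (k : Int) : Int × Int :=
  if k = 0 then (0, 0)
  else
    let ring : Nat := findRing k 1
    let p : Int := k - 1 - 3 * (ring : Int) * ((ring : Int) - 1)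
    let side : Int := PySem.Int.floordiv p ring
    let step : Int := PySem.Int.mod p ring
    let c := PySem.List.pyGetD cornersB side (0, 0)
    let d := PySem.List.pyGetD dirsB side (0, 0)
    (c.1 * ring + (step + 1) * d.1, c.2 * ring + (step + 1) * d.2)

def coordN (k : Nat) : Int × Int := coordF (k : Int)

-- the positions appended by k straight steps of direction d from (q, r)
def apps (q r : Int) (d : Int × Int) (k : Nat) : List (Int × Int) :=
  (List.range k).map (fun (i : Nat) => (q + ((i : Int) + 1) * d.1, r + ((i : Int) + 1) * d.2))

def dirV (s : Nat) : Int × Int := dirsB.getD s (0, 0)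
def cornerV (s : Nat) : Int × Int := if s = 6 then (-1, 0) else cornersB.getD s (0, 0)

theorem rs_succ (t : Nat) : rs (t + 1) = rs t + 6 * (t + 1) := by unfold rs; ring

theorem apps_succ (q r : Int) (d : Int × Int) (k : Nat) :
    apps q r d (k + 1) = (q + d.1, r + d.2) :: apps (q + d.1) (r + d.2) d k := by
  unfold apps
  rw [List.range_succ_eq_map, List.map_cons, List.map_map]
  refine congrArg₂ _ (by norm_num) (List.map_congr_left ?_)
  intro i _
  simp only [Function.comp, Prod.mk.injEq]
  push_cast
  constructor <;> ring

theorem innerA_char (n : Int) (d : Int × Int) : ∀ (k : Nat) (c : List (Int × Int)) (q r : Int),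
    innerA n d k (c, q, r) =
      if k = 0 then .inr (c, q, r)
      else if (c.length : Int) + k ≤ n then .inr (c ++ apps q r d k, q + k * d.1, r + k * d.2)
      else .inl (c ++ apps q r d (n - c.length).toNat) := by
  intro k
  induction k with
  | zero => intro c q r; simp [innerA]
  | succ k ih =>
      intro c q r
      by_cases hlen : n ≤ (c.length : Int)
      · have h1 : ¬ ((c.length : Int) + ((k : Int) + 1) ≤ n) := by omega
        have h2 : (n - (c.length : Int)).toNat = 0 := by omega
        simp [innerA, hlen, h2, apps]
        omega
      · have hlt : (c.length : Int) < n := by omega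
        simp only [innerA, if_neg hlen, ih]
        by_cases hk : k = 0
        · subst hk
          by_cases hc : (c.length : Int) + ((0 : Nat) + 1 : Nat) ≤ n
          · have hc' : ((c ++ [(q + d.1, r + d.2)]).length : Int) + (0 : Nat) ≤ n := by
              simp; push_cast at hc ⊢; omega
            simp only [if_pos hc]
            simp [apps]
          · exfalso; push_cast at hc; omega
        · have hne : ¬ (k + 1 = 0) := by omega
          have hlc : ((c ++ [(q + d.1, r + d.2)]).length : Int) = (c.length : Int) + 1 := by simp
          simp only [if_neg hk, if_neg hne]
          by_cases hc : (c.length : Int) + ((k : Int) + 1) ≤ n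
          · have hc1 : ((c ++ [(q + d.1, r + d.2)]).length : Int) + (k : Int) ≤ n := by
              rw [hlc]; omega
            have hc2 : (c.length : Int) + ((k : Nat) + 1 : Nat) ≤ n := by push_cast; omega
            rw [if_pos hc1, if_pos hc2, apps_succ]
            simp only [List.append_assoc, List.singleton_append, Sum.inr.injEq, Prod.mk.injEq]
            and_intros
            all_goals first | trivial | (push_cast; ring)
          · have hc1 : ¬ (((c ++ [(q + d.1, r + d.2)]).length : Int) + (k : Int) ≤ n) := by
              rw [hlc]; omega
            have hc2 : ¬ ((c.length : Int) + ((k : Nat) + 1 : Nat) ≤ n) := by push_cast; omega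
            rw [if_neg hc1, if_neg hc2, hlc]
            have hj : (n - (c.length : Int)).toNat = (n - ((c.length : Int) + 1)).toNat + 1 := by omega
            rw [hj, apps_succ]
            simp [List.append_assoc]

theorem findRing_eq (t : Nat) (k : Int)
    (h1 : 3 * (t : Int) * ((t : Int) + 1) < k) (h2 : k ≤ 3 * ((t : Int) + 1) * ((t : Int) + 2)) :
    ∀ (r : Nat), (r : Int) ≤ (t : Int) + 1 → findRing k r = t + 1 := by
  intro r
  fun_induction findRing k r with
  | case1 ring hcond ih =>
      intro hr
      apply ih
      have : (ring : Int) < (t : Int) + 1 := by nlinarith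
      push_cast
      omega
  | case2 ring hcond =>
      intro hr
      have hk : k ≤ 3 * (ring : Int) * ((ring : Int) + 1) := by omega
      have : (t : Int) < (ring : Int) := by nlinarith
      have : (ring : Int) = (t : Int) + 1 := by omega
      exact_mod_cast this

theorem coordB_ring (t s u : Nat) (hs : s < 6) (hu : u < t + 1) :
    coordN (rs t + s * (t + 1) + u) =
      ((cornerV s).1 * ((t : Int) + 1) + ((u : Int) + 1) * (dirV s).1,
       (cornerV s).2 * ((t : Int) + 1) + ((u : Int) + 1) * (dirV s).2) := by
  have hK : ((rs t + s * (t + 1) + u : Nat) : Int) = 1 + 3 * (t : Int) * ((t : Int) + 1) + (s : Int) * ((t : Int) + 1) + (u : Int) := by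
    unfold rs; push_cast; ring
  have hs5 : (s : Int) ≤ 5 := by exact_mod_cast Nat.le_of_lt_succ hs
  have hut : (u : Int) ≤ (t : Int) := by exact_mod_cast Nat.le_of_lt_succ hu
  have hs0 : (0 : Int) ≤ (s : Int) := Int.natCast_nonneg s
  have hu0 : (0 : Int) ≤ (u : Int) := Int.natCast_nonneg u
  have ht0 : (0 : Int) ≤ (t : Int) := Int.natCast_nonneg t
  have hk0 : ((rs t + s * (t + 1) + u : Nat) : Int) ≠ 0 := by rw [hK]; nlinarith
  have hring : findRing ((rs t + s * (t + 1) + u : Nat) : Int) 1 = t + 1 := by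
    apply findRing_eq t _ ?_ ?_ 1 (by omega)
    · rw [hK]; nlinarith
    · rw [hK]; nlinarith
  unfold coordN coordF
  rw [if_neg hk0, hring]
  have hp : ((rs t + s * (t + 1) + u : Nat) : Int) - 1 - 3 * ((t + 1 : Nat) : Int) * (((t + 1 : Nat) : Int) - 1)
      = (s : Int) * ((t : Int) + 1) + (u : Int) := by rw [hK]; push_cast; ring
  have hpos : (0 : Int) < ((t + 1 : Nat) : Int) := by push_cast; omega
  have hside : PySem.Int.floordiv ((s : Int) * ((t : Int) + 1) + (u : Int)) ((t + 1 : Nat) : Int) = (s : Int) := by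
    rw [PySem.Int.floordiv_eq_iff_of_pos hpos]
    constructor
    · push_cast; nlinarith
    · push_cast; nlinarith
  have hmod : PySem.Int.mod ((s : Int) * ((t : Int) + 1) + (u : Int)) ((t + 1 : Nat) : Int) = (u : Int) := by
    have := PySem.Int.floordiv_mul_add_mod ((s : Int) * ((t : Int) + 1) + (u : Int)) ((t + 1 : Nat) : Int)
    rw [hside] at this
    push_cast at this ⊢
    linarith
  have hc : cornersB.getD s (0, 0) = cornerV s := by unfold cornerV; rw [if_neg (by omega)]
  have hd : dirsB.getD s (0, 0) = dirV s := rfl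
  simp only [hp, hside, hmod, PySem.List.pyGetD_natCast, hc, hd]
  constructor

theorem corner_step (s : Nat) (hs : s < 6) :
    cornerV (s + 1) = ((cornerV s).1 + (dirV s).1, (cornerV s).2 + (dirV s).2) := by
  interval_cases s <;> rfl

theorem dirsA_drop (s : Nat) (hs : s < 6) : dirsA.drop s = dirV s :: dirsA.drop (s + 1) := by
  interval_cases s <;> rfl

theorem apps_coord (t s : Nat) (hs : s < 6) (j : Nat) (hj : j ≤ t + 1) :
    List.map coordN (List.range (rs t + s * (t + 1))) ++
      apps ((cornerV s).1 * ((t : Int) + 1)) ((cornerV s).2 * ((t : Int) + 1)) (dirV s) j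
    = List.map coordN (List.range (rs t + s * (t + 1) + j)) := by
  conv_rhs => rw [List.range_add, List.map_append]
  congr 1
  unfold apps
  rw [List.map_map]
  apply List.map_congr_left
  intro i hi
  have hi' : i < t + 1 := lt_of_lt_of_le (List.mem_range.mp hi) hj
  have : coordN (rs t + s * (t + 1) + i) =
      ((cornerV s).1 * ((t : Int) + 1) + ((i : Int) + 1) * (dirV s).1,
       (cornerV s).2 * ((t : Int) + 1) + ((i : Int) + 1) * (dirV s).2) := coordB_ring t s i hs hi'
  simp only [Function.comp]
  rw [this]

theorem side_step (n : Int) (t s : Nat) (hs : s < 6)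
    (hm : ((rs t + s * (t + 1) : Nat) : Int) ≤ n) :
    innerA n (dirV s) (t + 1)
      (List.map coordN (List.range (rs t + s * (t + 1))),
        (cornerV s).1 * ((t : Int) + 1), (cornerV s).2 * ((t : Int) + 1)) =
      if ((rs t + (s + 1) * (t + 1) : Nat) : Int) ≤ n then
        Sum.inr (List.map coordN (List.range (rs t + (s + 1) * (t + 1))),
          (cornerV (s + 1)).1 * ((t : Int) + 1), (cornerV (s + 1)).2 * ((t : Int) + 1))
      else Sum.inl (List.map coordN (List.range n.toNat)) := by
  rw [innerA_char]
  have hlen : ((List.map coordN (List.range (rs t + s * (t + 1)))).length : Int)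
      = ((rs t + s * (t + 1) : Nat) : Int) := by simp
  have hsum : rs t + s * (t + 1) + (t + 1) = rs t + (s + 1) * (t + 1) := by ring
  rw [if_neg (by omega : ¬ (t + 1 = 0))]
  have key : ((rs t + s * (t + 1) : Nat) : Int) + ((t + 1 : Nat) : Int) = ((rs t + (s + 1) * (t + 1) : Nat) : Int) := by
    rw [← hsum]; push_cast; ring
  by_cases hc : ((rs t + (s + 1) * (t + 1) : Nat) : Int) ≤ n
  · have hc' : ((List.map coordN (List.range (rs t + s * (t + 1)))).length : Int) + ((t + 1 : Nat) : Int) ≤ n := by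
      rw [hlen, key]; exact hc
    rw [if_pos hc', if_pos hc]
    rw [apps_coord t s hs (t + 1) le_rfl, hsum]
    rw [corner_step s hs]
    simp only [Sum.inr.injEq, Prod.mk.injEq]
    and_intros
    all_goals first | trivial | (push_cast; ring)
  · have hc' : ¬ (((List.map coordN (List.range (rs t + s * (t + 1)))).length : Int) + ((t + 1 : Nat) : Int) ≤ n) := by
      rw [hlen, key]; exact hc
    rw [if_neg hc', if_neg hc, hlen]
    have hn' : n < ((rs t + s * (t + 1) : Nat) : Int) + ((t + 1 : Nat) : Int) := by rw [key]; omega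
    have hj : (n - ((rs t + s * (t + 1) : Nat) : Int)).toNat ≤ t + 1 := by omega
    rw [apps_coord t s hs _ hj]
    have : rs t + s * (t + 1) + (n - ((rs t + s * (t + 1) : Nat) : Int)).toNat = n.toNat := by omega
    rw [this]

theorem sides_char (n : Int) (t : Nat) : ∀ (j s : Nat), s + j = 6 →
    ((rs t + s * (t + 1) : Nat) : Int) ≤ n →
    sidesA n (t + 1) (dirsA.drop s)
      (List.map coordN (List.range (rs t + s * (t + 1))),
        (cornerV s).1 * ((t : Int) + 1), (cornerV s).2 * ((t : Int) + 1)) =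
      if ((rs (t + 1) : Nat) : Int) ≤ n then
        Sum.inr (List.map coordN (List.range (rs (t + 1))),
          (cornerV 6).1 * ((t : Int) + 1), (cornerV 6).2 * ((t : Int) + 1))
      else Sum.inl (List.map coordN (List.range n.toNat)) := by
  intro j
  induction j with
  | zero =>
      intro s hs hm
      have hs6 : s = 6 := by omega
      subst hs6
      have h6 : rs t + 6 * (t + 1) = rs (t + 1) := by rw [rs_succ]
      rw [h6] at hm ⊢
      simp [sidesA, dirsA, if_pos hm]
  | succ j ih =>
      intro s hs hm
      have hs6 : s < 6 := by omega
      rw [dirsA_drop s hs6]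
      simp only [sidesA]
      rw [side_step n t s hs6 hm]
      by_cases hc : ((rs t + (s + 1) * (t + 1) : Nat) : Int) ≤ n
      · rw [if_pos hc]
        exact ih (s + 1) (by omega) hc
      · rw [if_neg hc]
        have hle : rs t + (s + 1) * (t + 1) ≤ rs (t + 1) := by
          rw [rs_succ]
          have : (s + 1) * (t + 1) ≤ 6 * (t + 1) := Nat.mul_le_mul_right _ (by omega)
          omega
        rw [if_neg (by omega)]

theorem whileA_char (n : Int) : ∀ (j t : Nat), n.toNat ≤ rs t + j →
    ((rs t : Nat) : Int) < n →
    whileA n (List.map coordN (List.range (rs t))) t = List.map coordN (List.range n.toNat) := by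
  intro j
  induction j with
  | zero => intro t hj hlt; exfalso; omega
  | succ j ih =>
      intro t hj hlt
      rw [whileA]
      have hlen : ((List.map coordN (List.range (rs t))).length : Int) < n := by simpa using hlt
      rw [dif_pos hlen]
      have hst : sidesA n (t + 1) dirsA
          (List.map coordN (List.range (rs t)), -((t : Int) + 1), 0) =
          if ((rs (t + 1) : Nat) : Int) ≤ n then
            Sum.inr (List.map coordN (List.range (rs (t + 1))),
              (cornerV 6).1 * ((t : Int) + 1), (cornerV 6).2 * ((t : Int) + 1))
          else Sum.inl (List.map coordN (List.range n.toNat)) := by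
        have h0 := sides_char n t 6 0 (by omega) (le_of_lt (by simpa using hlt))
        simpa [cornerV, cornersB] using h0
      split
      next res hres =>
        rw [hres] at hst
        by_cases hc : ((rs (t + 1) : Nat) : Int) ≤ n
        · rw [if_pos hc] at hst
          exact absurd hst (by simp)
        · rw [if_neg hc] at hst
          simpa using hst
      next st' hres =>
        rw [hres] at hst
        by_cases hc : ((rs (t + 1) : Nat) : Int) ≤ n
        · rw [if_pos hc] at hst
          have hst1 : st'.1 = List.map coordN (List.range (rs (t + 1))) := by
            rw [Sum.inr.injEq] at hst
            rw [hst]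
          rw [hst1]
          by_cases heq : ((rs (t + 1) : Nat) : Int) < n
          · have hj' : n.toNat ≤ rs (t + 1) + j := by rw [rs_succ]; omega
            exact ih (t + 1) hj' heq
          · have hn : n = ((rs (t + 1) : Nat) : Int) := by omega
            rw [whileA]
            rw [dif_neg (by simp [hn])]
            have h0 : (0 : Int) ≤ n := by omega
            obtain ⟨m, rfl⟩ := Int.eq_ofNat_of_zero_le h0
            rw [PySem.List.slice_to_natCast]
            have : m = rs (t + 1) := by exact_mod_cast hn
            subst this
            simp
        · rw [if_neg hc] at hst
          exact absurd hst (by simp)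

theorem stepB_char (t s u r : Nat) (hs : s < 6) (hu : u < t + 1) (hr : (r : Int) ≤ (t : Int) + 1) (acc : List (Int × Int)) :
    stepB (r, acc) ((rs t + s * (t + 1) + u : Nat) : Int) = (t + 1, acc ++ [coordN (rs t + s * (t + 1) + u)]) := by
  have hK : ((rs t + s * (t + 1) + u : Nat) : Int) = 1 + 3 * (t : Int) * ((t : Int) + 1) + (s : Int) * ((t : Int) + 1) + (u : Int) := by
    unfold rs; push_cast; ring
  have hs5 : (s : Int) ≤ 5 := by exact_mod_cast Nat.le_of_lt_succ hs
  have hut : (u : Int) ≤ (t : Int) := by exact_mod_cast Nat.le_of_lt_succ hu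
  have hs0 : (0 : Int) ≤ (s : Int) := Int.natCast_nonneg s
  have hu0 : (0 : Int) ≤ (u : Int) := Int.natCast_nonneg u
  have ht0 : (0 : Int) ≤ (t : Int) := Int.natCast_nonneg t
  have hk0 : ((rs t + s * (t + 1) + u : Nat) : Int) ≠ 0 := by rw [hK]; nlinarith
  have hring1 : findRing ((rs t + s * (t + 1) + u : Nat) : Int) 1 = t + 1 := by
    apply findRing_eq t _ ?_ ?_ 1 (by omega)
    · rw [hK]; nlinarith
    · rw [hK]; nlinarith
  have hringr : findRing ((rs t + s * (t + 1) + u : Nat) : Int) r = t + 1 := by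
    apply findRing_eq t _ ?_ ?_ r hr
    · rw [hK]; nlinarith
    · rw [hK]; nlinarith
  unfold stepB coordN coordF
  rw [if_neg hk0, if_neg hk0]
  simp only [hring1, hringr]

theorem map_coordN_shift (K c : Nat) :
    List.map (fun i => coordN (K + i)) (List.range (c + 1))
      = coordN K :: List.map (fun i => coordN (K + 1 + i)) (List.range c) := by
  rw [List.range_succ_eq_map, List.map_cons, List.map_map]
  refine congrArg₂ _ (by simp) (List.map_congr_left ?_)
  intro i _
  simp only [Function.comp]
  congr 1
  omega

theorem foldB_from : ∀ (c t s u r : Nat) (acc : List (Int × Int)), s < 6 → u < t + 1 → (r : Int) ≤ (t : Int) + 1 →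
    ((PySem.List.pyRange ((rs t + s * (t + 1) + u : Nat) : Int) ((rs t + s * (t + 1) + u + c : Nat) : Int) 1).foldl stepB (r, acc)).2
      = acc ++ List.map (fun i => coordN (rs t + s * (t + 1) + u + i)) (List.range c) := by
  intro c
  induction c with
  | zero =>
      intro t s u r acc hs hu hr
      rw [PySem.List.pyRange_one_eq_nil (by simp)]
      simp
  | succ c ih =>
      intro t s u r acc hs hu hr
      rw [PySem.List.pyRange_one_cons (by push_cast; omega)]
      rw [List.foldl_cons, stepB_char t s u r hs hu hr acc]
      rw [map_coordN_shift, ← List.singleton_append, ← List.append_assoc]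
      have harg : ((rs t + s * (t + 1) + u : Nat) : Int) + 1 = ((rs t + s * (t + 1) + u + 1 : Nat) : Int) := by push_cast; ring
      rw [harg]
      by_cases hu1 : u + 1 < t + 1
      · have e1 : rs t + s * (t + 1) + u + 1 = rs t + s * (t + 1) + (u + 1) := by omega
        have e2 : rs t + s * (t + 1) + u + (c + 1) = rs t + s * (t + 1) + (u + 1) + c := by omega
        rw [e2, e1, ih t s (u + 1) (t + 1) _ hs hu1 (by push_cast; omega)]
        simp
      · have hut : u = t := by omega
        by_cases hs1 : s + 1 < 6
        · have e1 : rs t + s * (t + 1) + u + 1 = rs t + (s + 1) * (t + 1) + 0 := by subst hut; ring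
          have e2 : rs t + s * (t + 1) + u + (c + 1) = rs t + (s + 1) * (t + 1) + 0 + c := by omega
          rw [e2, e1, ih t (s + 1) 0 (t + 1) _ hs1 (by omega) (by push_cast; omega)]
          simp
        · have hs5 : s = 5 := by omega
          have e1 : rs t + s * (t + 1) + u + 1 = rs (t + 1) + 0 * (t + 1 + 1) + 0 := by
            subst hut hs5; rw [rs_succ]; ring
          have e2 : rs t + s * (t + 1) + u + (c + 1) = rs (t + 1) + 0 * (t + 1 + 1) + 0 + c := by omega
          rw [e2, e1, ih (t + 1) 0 0 (t + 1) _ (by omega) (by omega) (by push_cast; omega)]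
          simp

theorem alt_eq (n : Int) : hex_spiral_alt n = List.map coordN (List.range n.toNat) := by
  unfold hex_spiral_alt
  by_cases hn : n ≤ 0
  · rw [PySem.List.pyRange_one_eq_nil hn]
    simp [show n.toNat = 0 from by omega]
  · rw [PySem.List.pyRange_one_cons (by omega)]
    rw [List.foldl_cons]
    have hz : stepB (1, []) 0 = (1, [(0, 0)]) := rfl
    rw [hz]
    have e1 : (0 : Int) + 1 = ((rs 0 + 0 * (0 + 1) + 0 : Nat) : Int) := by simp [rs]
    have e2 : n = ((rs 0 + 0 * (0 + 1) + 0 + (n - 1).toNat : Nat) : Int) := by simp [rs]; omega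
    rw [e1]
    conv_lhs => rw [e2]
    rw [foldB_from (n - 1).toNat 0 0 0 1 [(0, 0)] (by omega) (by omega) (by omega)]
    have hsplit : n.toNat = 1 + (n - 1).toNat := by omega
    rw [hsplit, List.range_add, List.map_append, List.map_map]
    congr 1

theorem hex_spiral_spec : Claim_equal_hex_spiral := by
  unfold Claim_equal_hex_spiral Spec_hex_spiral
  intro n _
  unfold hex_spiral
  rw [alt_eq]
  by_cases h1 : 1 < n
  · have : [((0 : Int), (0 : Int))] = List.map coordN (List.range (rs 0)) := rfl
    rw [this]
    exact whileA_char n (n.toNat) 0 (by omega) (by simp [rs]; omega)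
  · rw [whileA]
    rw [dif_neg (by simp; omega)]
    by_cases h0 : 0 ≤ n
    · interval_cases n
      · decide
      · decide
    · have hneg : n = -(((-n).toNat : Nat) : Int) := by omega
      have hk : 0 < (-n).toNat := by omega
      rw [hneg, PySem.List.slice_to_neg_natCast _ _ hk]
      simp only [List.length_singleton]
      rw [show (1 - (-n).toNat) = 0 from by omega,
        show ((-(((-n).toNat : Nat) : Int)).toNat) = 0 from by omega]
      simp
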